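-- pv_equiv track=rewrite | github.com/Nauss/AdventOfCode | 2025/Day 6/main.py | part2
-- ===== SOURCE A (Python) =====
-- def get_number(lines, col):
--     number = ""
--     for i in range(len(lines)):
--         d = lines[i][col]
--         if d == " " or d == "*" or d == "+":
--             continue
--         number += d
--     return number
--
-- def add2(values):
--     result = 0
--     for v in values:
--         result += int(v)
--     return result
--
-- def mul2(values):
--     result = int(values[0])
--     for v in values[1:]:
--         result *= int(v)
--     return result
--
-- def part2(lines):
--     starts = []
--     for i in range(len(lines[-1])):
--         if lines[-1][i] == "+":
--             starts.append((i, "+"))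
--         if lines[-1][i] == "*":
--             starts.append((i, "*"))
--
--     result = 0
--     for col, type in starts:
--         numbers = []
--         current_col = col
--         current = get_number(lines, current_col)
--         while current != "":
--             numbers.append(current)
--             current_col += 1
--             if current_col >= len(lines[0]):
--                 break
--             current = get_number(lines, current_col)
--         if type == "+":
--             result += add2(numbers)
--         else:
--             result += mul2(numbers)
--     return result
-- ===== SOURCE B (Python) =====
-- def part2(lines):
--     width = len(lines[0])
--     last = lines[-1]
--     nc = max(len(line) for line in lines)
--     # per-column digit strings (short rows contribute nothing to far columns)
--     cols = ["".join(line[j] for line in lines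
--                     if j < len(line) and line[j] not in " +*")
--             for j in range(nc)]
--     # left-to-right sweep: mark the columns belonging to some marker's run
--     live = [False] * nc
--     active = False
--     for j in range(nc):
--         if j >= width:
--             active = False
--         if j < len(last) and last[j] in "+*":
--             active = True
--         live[j] = active and cols[j] != ""
--         if cols[j] == "":
--             active = False
--     # right-to-left suffix DP: sums[j]/prods[j] aggregate the run starting at j
--     sums = [0] * nc
--     prods = [None] * nc
--     for j in range(nc - 1, -1, -1):
--         if live[j]:
--             v = int(cols[j])
--             if j + 1 < width and live[j + 1]:
--                 sums[j] = v + sums[j + 1]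
--                 prods[j] = v * prods[j + 1]
--             else:
--                 sums[j] = v
--                 prods[j] = v
--     total = 0
--     for j, ch in enumerate(last):
--         if ch == "+":
--             total += sums[j]
--         elif ch == "*":
--             total += prods[j]
--     return total
-- ===== Notes on version B (the rewrite author's own statement) =====
-- stated objective: alternative
-- what changed: B replaces A's per-marker while-loop that rescans grid columns cell by cell with three flat passes: a transpose into column strings, one left-to-right sweep marking columns reachable from a marker, and one right-to-left suffix dynamic program computing each run's sum and product once (overlapping marker runs share suffixes), so the final pass over the last row is a plain table lookup.
import Mathlib
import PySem

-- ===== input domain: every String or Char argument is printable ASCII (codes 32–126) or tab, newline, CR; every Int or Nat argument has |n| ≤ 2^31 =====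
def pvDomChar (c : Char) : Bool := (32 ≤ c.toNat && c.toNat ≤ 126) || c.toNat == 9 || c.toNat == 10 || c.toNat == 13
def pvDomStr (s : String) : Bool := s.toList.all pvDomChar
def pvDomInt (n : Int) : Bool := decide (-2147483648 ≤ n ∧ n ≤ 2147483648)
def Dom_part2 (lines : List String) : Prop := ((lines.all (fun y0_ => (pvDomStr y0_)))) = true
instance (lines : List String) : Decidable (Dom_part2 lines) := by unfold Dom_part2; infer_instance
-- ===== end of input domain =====

-- B replaces A's per-marker column rescans by three flat passes: transpose into column
-- strings, a left-to-right sweep marking marker-reachable columns, and a right-to-left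
-- suffix DP that aggregates each run's sum and product once (alternative decomposition).


-- ===== PORT A =====
def get_numberA (lines : List String) (col : Int) : String :=
  lines.foldl (fun number line =>
    match PySem.Str.pyGet? line col with
    | none => number      -- Python raises IndexError on lines[i][col] here (outside Pre_)
    | some d => if d = ' ' ∨ d = '*' ∨ d = '+' then number else number.push d) ""

def add2A (values : List String) : Int :=
  values.foldl (fun result v => result + (PySem.Int.ofStr? v).getD 0) 0

def mul2A (values : List String) : Int :=
  match values with
  | [] => 0               -- Python raises IndexError on values[0] here (outside Pre_)
  | v :: rest => rest.foldl (fun result w => result * (PySem.Int.ofStr? w).getD 0)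
      ((PySem.Int.ofStr? v).getD 0)

-- the while-loop of part2 (fuel = remaining columns + 1; never exhausted)
def gatherA (lines : List String) (col : Int) (fuel : Nat) : List String :=
  match fuel with
  | 0 => []
  | f + 1 =>
    let current := get_numberA lines col
    if current = "" then []
    else current ::
      (if (((lines.headD "").toList.length : Int)) ≤ col + 1 then []
       else gatherA lines (col + 1) f)

def part2 (lines : List String) : Int :=
  let lastLine := (PySem.List.pyGet? lines (-1)).getD ""
  let starts := (List.range lastLine.toList.length).foldl
    (fun starts (i : Nat) =>
      let c := (PySem.Str.pyGet? lastLine (i : Int)).getD ' '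
      let s1 := if c = '+' then starts ++ [(i, '+')] else starts
      if c = '*' then s1 ++ [(i, '*')] else s1)
    ([] : List (Nat × Char))
  starts.foldl
    (fun result (pr : Nat × Char) =>
      let numbers := gatherA lines (pr.1 : Int) (((lines.headD "").toList.length - pr.1) + 1)
      result + (if pr.2 = '+' then add2A numbers else mul2A numbers))
    0

-- ===== PORT B =====
-- cols = ["".join(line[j] for line in lines if j < len(line) and line[j] not in " +*") for j in range(nc)]
def colsB (lines : List String) (nc : Nat) : List String :=
  (List.range nc).map (fun j =>
    String.ofList (lines.flatMap (fun line =>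
      match line.toList[j]? with
      | none => []
      | some ch => if ch == ' ' || ch == '+' || ch == '*' then [] else [ch])))

-- the left-to-right sweep marking the columns of some marker's run (loop over j, state = active)
def liveB (cols : List String) (last : List Char) (width nc : Nat) (j : Nat) (active : Bool) :
    List Bool :=
  if _h : j < nc then
    let a1 := if width ≤ j then false else active
    let a2 := if j < last.length && ((last.getD j ' ') == '+' || (last.getD j ' ') == '*')
      then true else a1
    (a2 && (cols.getD j "") != "") ::
      liveB cols last width nc (j + 1) (if (cols.getD j "") = "" then false else a2)
  else []
termination_by nc - j

-- the right-to-left suffix DP (reversed loop; list j.th element = arrays sums[j:], prods[j:])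
def dpB (cols : List String) (live : List Bool) (width nc : Nat) (j : Nat) :
    List Int × List (Option Int) :=
  if _h : j < nc then
    let sp := dpB cols live width nc (j + 1)
    if live.getD j false then
      let v := (PySem.Int.ofStr? (cols.getD j "")).getD 0
      if j + 1 < width && live.getD (j + 1) false then
        ((v + sp.1.headD 0) :: sp.1,
         -- '.getD 0' below: Python adds v * None (TypeError) there — outside Pre_, never hit
         some (v * (sp.2.headD none).getD 0) :: sp.2)
      else (v :: sp.1, some v :: sp.2)
    else (0 :: sp.1, none :: sp.2)
  else ([], [])
termination_by nc - j

def part2_alt (lines : List String) : Int :=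
  let width := (lines.headD "").toList.length       -- len(lines[0]); [] raises (outside Pre_)
  let last := ((PySem.List.pyGet? lines (-1)).getD "").toList
  let nc := ((lines.map (fun l => l.toList.length)).max?).getD 0
  let cols := colsB lines nc
  let live := liveB cols last width nc 0 false
  let sp := dpB cols live width nc 0
  (PySem.List.enumerate last 0).foldl (fun total pr =>
    if pr.2 = '+' then total + sp.1.getD pr.1.toNat 0
    else if pr.2 = '*' then
      -- '.getD 0': Python adds None here (TypeError) — outside Pre_, never hit
      total + (sp.2.getD pr.1.toNat none).getD 0
    else total) 0

-- ===== PRECONDITION & SPEC =====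
-- the j-th grid column padded with ' ' and stripped of spaces/markers (an input projection)
def pvCol (lines : List String) (j : Nat) : List Char :=
  (lines.map (fun l => l.toList.getD j ' ')).filter
    (fun ch => !(ch == ' ' || ch == '+' || ch == '*'))

def pvW (lines : List String) : Nat := (lines.headD "").toList.length

def pvNC (lines : List String) : Nat := ((lines.map (fun l => l.toList.length)).max?).getD 0

-- A reads grid column k while scanning from a marker at column j iff pvReadB lines j k
def pvReadB (lines : List String) (j k : Nat) : Bool :=
  k == j || (decide (j < k) && decide (k < pvW lines) &&
    (List.range k).all (fun m => decide (m < j) || !(pvCol lines m).isEmpty))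

-- every column read while scanning from a marker at j is within every row (else IndexError)
-- and, when non-empty, a valid int literal (else ValueError)
def pvScanOkB (lines : List String) (j : Nat) : Bool :=
  (List.range (pvNC lines + 1)).all (fun k =>
    !(pvReadB lines j k) ||
      ((lines.all (fun l => k < l.toList.length)) &&
       ((pvCol lines k).isEmpty ||
        (PySem.Int.ofStr? (String.ofList (pvCol lines k))).isSome)))

-- Pre_ holds exactly where Python A returns: it excludes the empty list (lines[-1] raises
-- IndexError) and grids where, on some column k that a marker's scan reads, some row is
-- shorter than k+1 (IndexError), or a read non-empty column is not a valid int literal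
-- (ValueError), or a '*' marker sits on an empty column (IndexError on values[0]).
def Pre_part2 (lines : List String) : Prop :=
  lines ≠ [] ∧
  ∀ j < (lines.getLastD "").toList.length,
    ((lines.getLastD "").toList.getD j ' ' = '+' ∨ (lines.getLastD "").toList.getD j ' ' = '*') →
      (pvScanOkB lines j = true ∧
       ((lines.getLastD "").toList.getD j ' ' = '*' → pvCol lines j ≠ []))
instance (lines : List String) : Decidable (Pre_part2 lines) := by
  unfold Pre_part2; infer_instance

def pvWitness_part2 : List String := ["12", "34", "+ "]

def Spec_part2 (lines : List String) (out : Int) : Prop := out = part2_alt lines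
instance (lines : List String) (out : Int) : Decidable (Spec_part2 lines out) := by
  unfold Spec_part2; infer_instance

-- ===== CLAIM (what is proved, stated in full; the proofs are below) =====
def Claim_equal_part2 : Prop :=
  ∀ (lines : List String), Dom_part2 lines → Pre_part2 lines → Spec_part2 lines (part2 lines)

-- ===== LEMMAS AND PROOFS =====

def parseI (s : String) : Int := (PySem.Int.ofStr? s).getD 0

def colStr (lines : List String) (j : Nat) : String := String.ofList (pvCol lines j)

def pvLast (lines : List String) : List Char := (lines.getLastD "").toList
def pvColsB (lines : List String) : List String := colsB lines (pvNC lines)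
def pvLiveL (lines : List String) : List Bool :=
  liveB (pvColsB lines) (pvLast lines) (pvW lines) (pvNC lines) 0 false
def pvDP (lines : List String) : List Int × List (Option Int) :=
  dpB (pvColsB lines) (pvLiveL lines) (pvW lines) (pvNC lines) 0


-- ---- generic small facts ----

theorem getD_zero_headD {α : Type} (l : List α) (d : α) : l.getD 0 d = l.headD d := by
  cases l <;> rfl

theorem foldl_mul_int (l : List Int) (a : Int) :
    l.foldl (fun p x => p * x) a = a * l.prod := by
  induction l generalizing a with
  | nil => simp
  | cons x xs ih => simp [List.foldl_cons, ih, mul_assoc]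

theorem pyGet_neg_one_getD (lines : List String) :
    (PySem.List.pyGet? lines (-1)).getD "" = lines.getLastD "" := by
  rw [PySem.List.pyGet?_neg_one]
  exact Eq.symm List.getLastD_eq_getLast?

theorem getLastD_mem (lines : List String) (h : lines ≠ []) : lines.getLastD "" ∈ lines := by
  cases lines with
  | nil => exact absurd rfl h
  | cons a as =>
    rw [List.getLastD_eq_getLast?, List.getLast?_eq_some_getLast (l := a :: as) (by simp)]
    exact List.getLast_mem _

theorem headD_mem (lines : List String) (h : lines ≠ []) : lines.headD "" ∈ lines := by
  cases lines with
  | nil => exact absurd rfl h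
  | cons a as => exact List.mem_cons_self

theorem len_le_nc (lines : List String) (l : String) (hl : l ∈ lines) :
    l.toList.length ≤ pvNC lines := by
  unfold pvNC
  cases hm : (lines.map (fun l => l.toList.length)).max? with
  | none =>
    rw [List.max?_eq_none_iff, List.map_eq_nil_iff] at hm
    subst hm; cases hl
  | some m =>
    rw [List.max?_eq_some_iff] at hm
    exact hm.2 _ (List.mem_map_of_mem hl)

theorem W_le_nc (lines : List String) (h : lines ≠ []) : pvW lines ≤ pvNC lines :=
  len_le_nc lines _ (headD_mem lines h)

-- ---- A-side: get_number, add2, mul2, the marker scan ----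

theorem get_numberA_fold (j : Nat) :
    ∀ (lines : List String), (∀ l ∈ lines, j < l.toList.length) → ∀ (s : List Char),
      lines.foldl (fun number line =>
        match PySem.Str.pyGet? line (j : Int) with
        | none => number
        | some d => if d = ' ' ∨ d = '*' ∨ d = '+' then number else number.push d)
        (String.ofList s)
      = String.ofList (s ++ pvCol lines j) := by
  intro lines
  induction lines with
  | nil => intro _ s; simp [pvCol]
  | cons l ls ih =>
    intro hj s
    have hl : j < l.toList.length := hj l (List.mem_cons_self)
    rw [List.foldl_cons]
    have hget : PySem.Str.pyGet? l (j : Int) = some l.toList[j] := by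
      rw [PySem.Str.pyGet?_natCast]
      exact List.getElem?_eq_getElem hl
    rw [hget]
    have hd : l.toList.getD j ' ' = l.toList[j] := List.getD_eq_getElem l.toList ' ' hl
    by_cases hc : l.toList[j] = ' ' ∨ l.toList[j] = '*' ∨ l.toList[j] = '+'
    · simp only [hc, if_pos]
      rw [ih (fun x hx => hj x (List.mem_cons_of_mem l hx)) s]
      congr 1
      simp only [pvCol, List.map_cons, List.filter_cons, hd]
      rcases hc with h | h | h <;> simp [h]
    · simp only [hc, if_neg, not_false_iff]
      have hpush : (String.ofList s).push l.toList[j] = String.ofList (s ++ [l.toList[j]]) := by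
        simp [String.push, String.ofList]
      rw [hpush, ih (fun x hx => hj x (List.mem_cons_of_mem l hx))]
      simp only [pvCol, List.map_cons, List.filter_cons, hd]
      push Not at hc
      simp [hc.1, hc.2.1, hc.2.2]

theorem get_numberA_eq (lines : List String) (j : Nat)
    (hj : ∀ l ∈ lines, j < l.toList.length) :
    get_numberA lines (j : Int) = colStr lines j := by
  have h := get_numberA_fold j lines hj []
  simpa [get_numberA, colStr] using h

theorem add2A_eq (numbers : List String) : add2A numbers = (numbers.map parseI).sum := by
  unfold add2A parseI
  rw [PySem.List.foldl_add]
  simp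

theorem mul2A_eq (v : String) (rest : List String) :
    mul2A (v :: rest) = ((v :: rest).map parseI).prod := by
  simp only [mul2A, parseI, List.map_cons, List.prod_cons]
  rw [show (fun (result : Int) (w : String) => result * (PySem.Int.ofStr? w).getD 0)
      = (fun result w => result * parseI w) from rfl]
  rw [← List.foldl_map (f := parseI) (g := fun (p : Int) (x : Int) => p * x)]
  exact foldl_mul_int _ _

-- the (at most one-element) starts-contribution of column i in A's marker scan
def gMark (last : List Char) (i : Nat) : List (Nat × Char) :=
  (if last.getD i ' ' = '+' then [(i, '+')] else []) ++
  (if last.getD i ' ' = '*' then [(i, '*')] else [])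

-- the numbers list A's while-loop builds from column i
def pvNums (lines : List String) (i : Nat) : List String :=
  gatherA lines (i : Int) (((lines.headD "").toList.length - i) + 1)

def fA (lines : List String) (pr : Nat × Char) : Int :=
  if pr.2 = '+' then add2A (pvNums lines pr.1) else mul2A (pvNums lines pr.1)

theorem sum_flatMap_int (g : Nat → List (Nat × Char)) (f : Nat × Char → Int) (l : List Nat) :
    ((l.flatMap g).map f).sum = (l.map (fun a => ((g a).map f).sum)).sum := by
  induction l with
  | nil => rfl
  | cons a as ih => simp [List.flatMap_cons, ih]

theorem partA_sum (lines : List String) :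
    part2 lines =
      ((List.range (pvLast lines).length).map
        (fun i => ((gMark (pvLast lines) i).map (fA lines)).sum)).sum := by
  unfold part2 pvLast
  dsimp only
  rw [pyGet_neg_one_getD]
  have hstep : (fun (starts : List (Nat × Char)) (i : Nat) =>
      let c := (PySem.Str.pyGet? (lines.getLastD "") (i : Int)).getD ' '
      let s1 := if c = '+' then starts ++ [(i, '+')] else starts
      if c = '*' then s1 ++ [(i, '*')] else s1)
      = fun starts i => starts ++ gMark (lines.getLastD "").toList i := by
    funext starts i
    dsimp only
    rw [PySem.Str.pyGet?_natCast, ← List.getD_eq_getElem?_getD]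
    by_cases h1 : (lines.getLastD "").toList.getD i ' ' = '+'
    · have hg : gMark (lines.getLastD "").toList i = [(i, '+')] := by
        unfold gMark; rw [if_pos h1, if_neg (by rw [h1]; decide), List.append_nil]
      rw [if_pos h1, if_neg (by rw [h1]; decide), hg]
    · rw [if_neg h1]
      by_cases h2 : (lines.getLastD "").toList.getD i ' ' = '*'
      · have hg : gMark (lines.getLastD "").toList i = [(i, '*')] := by
          unfold gMark; rw [if_neg h1, if_pos h2, List.nil_append]
        rw [if_pos h2, hg]
      · have hg : gMark (lines.getLastD "").toList i = [] := by
          unfold gMark; rw [if_neg h1, if_neg h2, List.append_nil]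
        rw [if_neg h2, hg, List.append_nil]
  rw [hstep, PySem.List.foldl_append_eq_flatMap, List.nil_append,
    PySem.List.foldl_add, sum_flatMap_int]
  simp only [zero_add]
  rfl

-- ---- B-side: columns ----

theorem flatMap_col (j : Nat) : ∀ (lines : List String),
    lines.flatMap (fun line =>
      match line.toList[j]? with
      | none => []
      | some ch => if ch == ' ' || ch == '+' || ch == '*' then [] else [ch])
    = pvCol lines j := by
  intro lines
  induction lines with
  | nil => rfl
  | cons l ls ih =>
    rw [List.flatMap_cons, ih]
    simp only [pvCol, List.map_cons, List.filter_cons]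
    cases hg : l.toList[j]? with
    | none =>
      have : l.toList.getD j ' ' = ' ' := by
        simp [List.getD_eq_getElem?_getD, hg]
      rw [this]
      simp
    | some c =>
      have : l.toList.getD j ' ' = c := by
        simp [List.getD_eq_getElem?_getD, hg]
      rw [this]
      by_cases hc : c == ' ' || c == '+' || c == '*'
      · simp only [hc, if_pos]
        simp only [Bool.or_eq_true, beq_iff_eq] at hc
        rcases hc with (h | h) | h <;> subst h <;> simp
      · simp only [hc, if_neg, Bool.not_eq_true]
        simp

theorem colsB_getD (lines : List String) (nc j : Nat) (hj : j < nc) :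
    (colsB lines nc).getD j "" = colStr lines j := by
  unfold colsB colStr
  rw [List.getD_eq_getElem?_getD, List.getElem?_map, List.getElem?_range hj]
  simp only [Option.map_some, Option.getD_some]
  rw [flatMap_col]

-- ---- B-side: the live sweep ----

-- state update and per-column value of the sweep (mirrors one body of the loop)
def nextA (cols : List String) (last : List Char) (width : Nat) (a : Bool) (j : Nat) : Bool :=
  if (cols.getD j "") = "" then false
  else if j < last.length && ((last.getD j ' ') == '+' || (last.getD j ' ') == '*') then true
  else if width ≤ j then false else a

def liveVal (cols : List String) (last : List Char) (width : Nat) (a : Bool) (j : Nat) : Bool :=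
  (if j < last.length && ((last.getD j ' ') == '+' || (last.getD j ' ') == '*') then true
   else if width ≤ j then false else a) && (cols.getD j "") != ""

def iterSt (cols : List String) (last : List Char) (width : Nat) (a : Bool) (j : Nat) :
    Nat → Bool
  | 0 => a
  | d + 1 => iterSt cols last width (nextA cols last width a j) (j + 1) d

theorem iterSt_succ_right (cols : List String) (last : List Char) (width : Nat) :
    ∀ d a j, iterSt cols last width a j (d + 1)
      = nextA cols last width (iterSt cols last width a j d) (j + d) := by
  intro d
  induction d with
  | zero => intro a j; rfl
  | succ m ih =>
    intro a j
    show iterSt cols last width (nextA cols last width a j) (j + 1) (m + 1) = _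
    rw [ih]
    congr 1
    omega

theorem live_getD (cols : List String) (last : List Char) (width nc : Nat) :
    ∀ d j a, j + d < nc →
      (liveB cols last width nc j a).getD d false
        = liveVal cols last width (iterSt cols last width a j d) (j + d) := by
  intro d
  induction d with
  | zero =>
    intro j a h
    rw [liveB, dif_pos (by omega)]
    rfl
  | succ m ih =>
    intro j a h
    rw [liveB, dif_pos (by omega)]
    dsimp only
    rw [List.getD_cons_succ]
    have := ih (j + 1) (if (cols.getD j "") = "" then false else
      (if j < last.length && ((last.getD j ' ') == '+' || (last.getD j ' ') == '*')
       then true else if width ≤ j then false else a)) (by omega)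
    rw [this]
    have harg : (if (cols.getD j "") = "" then false else
        (if j < last.length && ((last.getD j ' ') == '+' || (last.getD j ' ') == '*')
         then true else if width ≤ j then false else a)) = nextA cols last width a j := by
      unfold nextA
      rfl
    rw [harg]
    have hidx : j + 1 + m = j + (m + 1) := by omega
    rw [hidx]
    rfl

def stateS (lines : List String) (j : Nat) : Bool :=
  iterSt (pvColsB lines) (pvLast lines) (pvW lines) false 0 j

def liveAt (lines : List String) (j : Nat) : Bool := (pvLiveL lines).getD j false

theorem liveAt_eq (lines : List String) (j : Nat) (hj : j < pvNC lines) :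
    liveAt lines j
      = liveVal (pvColsB lines) (pvLast lines) (pvW lines) (stateS lines j) j := by
  unfold liveAt pvLiveL stateS
  have := live_getD (pvColsB lines) (pvLast lines) (pvW lines) (pvNC lines) j 0 false
    (by omega)
  simpa using this

theorem liveAt_marker (lines : List String) (j : Nat) (hj : j < pvNC lines)
    (hm : j < (pvLast lines).length)
    (hc : (pvLast lines).getD j ' ' = '+' ∨ (pvLast lines).getD j ' ' = '*') :
    liveAt lines j = ((pvColsB lines).getD j "" != "") := by
  rw [liveAt_eq lines j hj]
  unfold liveVal
  have hmk : (decide (j < (pvLast lines).length)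
      && (((pvLast lines).getD j ' ') == '+' || ((pvLast lines).getD j ' ') == '*')) = true := by
    have hj' : decide (j < (pvLast lines).length) = true := by simp [hm]
    rcases hc with h | h <;> rw [hj', h] <;> simp
  rw [if_pos hmk, Bool.true_and]

theorem liveAt_step (lines : List String) (j : Nat) (hj1 : j + 1 < pvW lines)
    (hnc : j + 1 < pvNC lines)
    (hl : liveAt lines j = true) :
    liveAt lines (j + 1) = ((pvColsB lines).getD (j + 1) "" != "") := by
  rw [liveAt_eq lines j (by omega)] at hl
  unfold liveVal at hl
  rw [Bool.and_eq_true] at hl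
  obtain ⟨ha2, hcne⟩ := hl
  have hnext : stateS lines (j + 1) = true := by
    unfold stateS
    have h := iterSt_succ_right (pvColsB lines) (pvLast lines) (pvW lines) j false 0
    simp only [Nat.zero_add] at h
    rw [h]
    unfold nextA
    rw [if_neg (by simpa using hcne)]
    exact ha2
  rw [liveAt_eq lines (j + 1) hnc, hnext]
  unfold liveVal
  by_cases hmk : (decide (j + 1 < (pvLast lines).length)
      && (((pvLast lines).getD (j + 1) ' ') == '+' || ((pvLast lines).getD (j + 1) ' ') == '*')) = true
  · rw [if_pos hmk, Bool.true_and]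
  · rw [if_neg hmk, if_neg (by omega), Bool.true_and]

-- ---- B-side: the DP ----

theorem dp_cons (cols : List String) (live : List Bool) (width nc j : Nat) (hj : j < nc) :
    ∃ a b, dpB cols live width nc j
      = (a :: (dpB cols live width nc (j + 1)).1, b :: (dpB cols live width nc (j + 1)).2) := by
  rw [dpB, dif_pos hj]
  dsimp only
  split_ifs <;> exact ⟨_, _, rfl⟩

theorem dp_shift (cols : List String) (live : List Bool) (width nc : Nat) :
    ∀ d j, ((dpB cols live width nc j).1.getD d 0
          = (dpB cols live width nc (j + d)).1.headD 0)
      ∧ ((dpB cols live width nc j).2.getD d none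
          = (dpB cols live width nc (j + d)).2.headD none) := by
  intro d
  induction d with
  | zero =>
    intro j
    exact ⟨getD_zero_headD _ _, getD_zero_headD _ _⟩
  | succ m ih =>
    intro j
    by_cases hj : j < nc
    · obtain ⟨a, b, hab⟩ := dp_cons cols live width nc j hj
      rw [hab]
      simp only [List.getD_cons_succ]
      have := ih (j + 1)
      rw [show j + 1 + m = j + (m + 1) by omega] at this
      exact this
    · have h1 : dpB cols live width nc j = ([], []) := by rw [dpB, dif_neg hj]
      have h2 : dpB cols live width nc (j + (m + 1)) = ([], []) := by
        rw [dpB, dif_neg (by omega)]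
      rw [h1, h2]
      exact ⟨rfl, rfl⟩

theorem dp_head_dead (cols : List String) (live : List Bool) (width nc j : Nat) (hj : j < nc)
    (hl : live.getD j false = false) :
    (dpB cols live width nc j).1.headD 0 = 0
      ∧ (dpB cols live width nc j).2.headD none = none := by
  rw [dpB, dif_pos hj]
  dsimp only
  rw [hl]
  exact ⟨rfl, rfl⟩

theorem dp_head_live (cols : List String) (live : List Bool) (width nc j : Nat) (hj : j < nc)
    (hl : live.getD j false = true) :
    (dpB cols live width nc j).1.headD 0
      = (if j + 1 < width && live.getD (j + 1) false
         then (PySem.Int.ofStr? (cols.getD j "")).getD 0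
                + (dpB cols live width nc (j + 1)).1.headD 0
         else (PySem.Int.ofStr? (cols.getD j "")).getD 0)
    ∧ (dpB cols live width nc j).2.headD none
      = (if j + 1 < width && live.getD (j + 1) false
         then some ((PySem.Int.ofStr? (cols.getD j "")).getD 0
                * (((dpB cols live width nc (j + 1)).2.headD none).getD 0))
         else some ((PySem.Int.ofStr? (cols.getD j "")).getD 0)) := by
  rw [dpB, dif_pos hj]
  dsimp only
  rw [hl]
  by_cases hc : (decide (j + 1 < width) && live.getD (j + 1) false) = true
  · rw [if_pos hc, if_pos hc, if_pos hc]
    exact ⟨rfl, rfl⟩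
  · rw [if_neg hc, if_neg hc, if_neg hc]
    exact ⟨rfl, rfl⟩

-- ---- the read relation ----

theorem readB_self (lines : List String) (j : Nat) : pvReadB lines j j = true := by
  simp [pvReadB]

theorem readB_succ (lines : List String) (j : Nat) (hj1 : j + 1 < pvW lines)
    (hc : pvCol lines j ≠ []) : pvReadB lines j (j + 1) = true := by
  unfold pvReadB
  apply Bool.or_eq_true_iff.mpr
  right
  simp only [Bool.and_eq_true, decide_eq_true_eq, List.all_eq_true, Bool.or_eq_true,
    Bool.not_eq_true', List.isEmpty_eq_false_iff]
  refine ⟨⟨by omega, hj1⟩, ?_⟩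
  intro m hm
  rw [List.mem_range] at hm
  by_cases h : m < j
  · exact Or.inl (by simpa using h)
  · have : m = j := by omega
    subst this
    exact Or.inr hc

theorem read_mono (lines : List String) (j : Nat) (hj1 : j + 1 < pvW lines)
    (hc : pvCol lines j ≠ []) (k : Nat) :
    pvReadB lines (j + 1) k = true → pvReadB lines j k = true := by
  intro h
  unfold pvReadB at h ⊢
  simp only [Bool.or_eq_true, beq_iff_eq, Bool.and_eq_true, decide_eq_true_eq,
    List.all_eq_true, Bool.or_eq_true, Bool.not_eq_true', List.isEmpty_eq_false_iff] at h ⊢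
  rcases h with h | ⟨⟨hlt, hW⟩, hchain⟩
  · -- k = j + 1
    subst h
    right
    refine ⟨⟨by omega, hj1⟩, ?_⟩
    intro m hm
    rw [List.mem_range] at hm
    by_cases hmj : m < j
    · exact Or.inl hmj
    · have : m = j := by omega
      subst this
      exact Or.inr hc
  · right
    refine ⟨⟨by omega, hW⟩, ?_⟩
    intro m hm
    rw [List.mem_range] at hm
    by_cases hmj : m < j
    · exact Or.inl hmj
    · by_cases hmj1 : m = j
      · subst hmj1; exact Or.inr hc
      · have hmem : m ∈ List.range k := List.mem_range.mpr hm
        rcases hchain m hmem with h' | h'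
        · omega
        · exact Or.inr h'

-- unpack the Bool scan condition of Pre_ into usable facts
theorem scanOk_spec (lines : List String) (j : Nat) (h : pvScanOkB lines j = true) :
    ∀ k, k ≤ pvNC lines → pvReadB lines j k = true →
      (∀ l ∈ lines, k < l.toList.length) ∧
      (pvCol lines k ≠ [] →
        (PySem.Int.ofStr? (String.ofList (pvCol lines k))).isSome = true) := by
  intro k hk hr
  unfold pvScanOkB at h
  rw [List.all_eq_true] at h
  have := h k (List.mem_range.mpr (by omega))
  rw [hr] at this
  simp only [Bool.not_true, Bool.false_or, Bool.and_eq_true, List.all_eq_true,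
    decide_eq_true_eq, Bool.or_eq_true, List.isEmpty_iff] at this
  exact ⟨this.1, fun hne => this.2.resolve_left hne⟩

-- ---- the run lemma: DP head at a live column = A's gathered run, aggregated ----

theorem run_dp (lines : List String) (hne : lines ≠ []) :
    ∀ fuel j, pvW lines ≤ j + fuel → j < pvW lines →
      pvCol lines j ≠ [] →
      liveAt lines j = true →
      (∀ k, k ≤ pvNC lines → pvReadB lines j k = true → ∀ l ∈ lines, k < l.toList.length) →
      (dpB (pvColsB lines) (pvLiveL lines) (pvW lines) (pvNC lines) j).1.headD 0
        = ((gatherA lines (j : Int) (pvW lines - j + 1)).map parseI).sum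
      ∧ (dpB (pvColsB lines) (pvLiveL lines) (pvW lines) (pvNC lines) j).2.headD none
        = some (((gatherA lines (j : Int) (pvW lines - j + 1)).map parseI).prod) := by
  intro fuel
  induction fuel with
  | zero => intro j h1 h2 _ _ _; omega
  | succ f ih =>
    intro j hfuel hjW hcol hlive hH
    have hWnc := W_le_nc lines hne
    have hjnc : j < pvNC lines := by omega
    have hinj : ∀ l ∈ lines, j < l.toList.length :=
      hH j (by omega) (readB_self lines j)
    have hcur : get_numberA lines (j : Int) = colStr lines j := get_numberA_eq lines j hinj
    have hcols : (pvColsB lines).getD j "" = colStr lines j :=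
      colsB_getD lines (pvNC lines) j hjnc
    have hstr : colStr lines j ≠ "" := by
      simpa [colStr, String.ofList_eq_empty_iff] using hcol
    have hlive' : (pvLiveL lines).getD j false = true := hlive
    have hg : gatherA lines (j : Int) (pvW lines - j + 1)
        = colStr lines j ::
          (if ((pvW lines : Int)) ≤ (j : Int) + 1 then []
           else gatherA lines ((j : Int) + 1) (pvW lines - j)) := by
      rw [gatherA]
      rw [hcur, if_neg hstr]
      rfl
    have hdp := dp_head_live (pvColsB lines) (pvLiveL lines) (pvW lines) (pvNC lines) j
      hjnc hlive'
    have hv : (PySem.Int.ofStr? ((pvColsB lines).getD j "")).getD 0 = parseI (colStr lines j) := by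
      rw [hcols]; rfl
    by_cases hW1 : pvW lines ≤ j + 1
    · -- the run stops at the width bound: numbers = [colStr j]
      have hgather : gatherA lines (j : Int) (pvW lines - j + 1) = [colStr lines j] := by
        rw [hg, if_pos (by exact_mod_cast hW1)]
      have hlive1 : (pvLiveL lines).getD (j + 1) false = liveAt lines (j + 1) := rfl
      have hcond : (decide (j + 1 < pvW lines) && (pvLiveL lines).getD (j + 1) false) = false := by
        simp [Nat.not_lt_of_le hW1]
      rw [hcond] at hdp
      simp only [if_neg Bool.false_ne_true] at hdp
      rw [hgather, hdp.1, hdp.2, hv]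
      simp
    · -- the run continues into column j+1
      push Not at hW1
      have hj1nc : j + 1 < pvNC lines := by omega
      have hinj1 : ∀ l ∈ lines, j + 1 < l.toList.length :=
        hH (j + 1) (by omega) (readB_succ lines j hW1 hcol)
      have hcur1 : get_numberA lines ((j : Int) + 1) = colStr lines (j + 1) := by
        have := get_numberA_eq lines (j + 1) hinj1
        rwa [show (((j + 1 : Nat)) : Int) = (j : Int) + 1 by push_cast; ring] at this
      have hcols1 : (pvColsB lines).getD (j + 1) "" = colStr lines (j + 1) :=
        colsB_getD lines (pvNC lines) (j + 1) hj1nc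
      have hlivestep := liveAt_step lines j hW1 hj1nc hlive
      have htail : gatherA lines (j : Int) (pvW lines - j + 1)
          = colStr lines j :: gatherA lines ((j : Int) + 1) (pvW lines - j) := by
        rw [hg, if_neg (by exact_mod_cast Nat.not_le_of_lt hW1)]
      by_cases hcol1 : pvCol lines (j + 1) = []
      · -- next column empty: the run is exactly [colStr j]
        have hstr1 : colStr lines (j + 1) = "" := by
          simp [colStr, hcol1]
        have hg1 : gatherA lines ((j : Int) + 1) (pvW lines - j) = [] := by
          have hw : pvW lines - j = (pvW lines - (j + 1)) + 1 := by omega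
          rw [hw, gatherA]
          rw [hcur1, if_pos hstr1]
        have hcond : (decide (j + 1 < pvW lines) && (pvLiveL lines).getD (j + 1) false) = false := by
          have : liveAt lines (j + 1) = false := by
            rw [hlivestep, hcols1, hstr1]
            rfl
          rw [show (pvLiveL lines).getD (j + 1) false = liveAt lines (j + 1) from rfl, this]
          simp
        rw [hcond] at hdp
        simp only [if_neg Bool.false_ne_true] at hdp
        rw [htail, hg1, hdp.1, hdp.2, hv]
        simp
      · -- next column non-empty: recurse
        have hstr1 : colStr lines (j + 1) ≠ "" := by
          simpa [colStr, String.ofList_eq_empty_iff] using hcol1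
        have hlive1 : liveAt lines (j + 1) = true := by
          rw [hlivestep, hcols1]
          simpa using hstr1
        have hcond : (decide (j + 1 < pvW lines) && (pvLiveL lines).getD (j + 1) false) = true := by
          rw [show (pvLiveL lines).getD (j + 1) false = liveAt lines (j + 1) from rfl, hlive1]
          simp [hW1]
        have hIH := ih (j + 1) (by omega) hW1 hcol1 hlive1
          (fun k hk hr => hH k hk (read_mono lines j hW1 hcol k hr))
        have hw : pvW lines - (j + 1) + 1 = pvW lines - j := by omega
        rw [hw] at hIH
        have hcast : (((j + 1 : Nat)) : Int) = (j : Int) + 1 := by push_cast; ring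
        rw [hcast] at hIH
        rw [hcond] at hdp
        simp only [if_pos] at hdp
        rw [htail, hdp.1, hdp.2, hv, hIH.1, hIH.2]
        simp [List.prod_cons]

-- ---- per-marker contribution and the two sum shapes ----

def fB (lines : List String) (j : Nat) (c : Char) : Int :=
  if c = '+' then (pvDP lines).1.getD j 0
  else if c = '*' then ((pvDP lines).2.getD j none).getD 0
  else 0

theorem partB_sum (lines : List String) :
    part2_alt lines =
      ((List.range (pvLast lines).length).map
        (fun i => fB lines i ((pvLast lines).getD i ' '))).sum := by
  unfold part2_alt
  dsimp only
  rw [pyGet_neg_one_getD]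
  show (PySem.List.enumerate (pvLast lines) 0).foldl
      (fun total pr =>
        if pr.2 = '+' then total + (pvDP lines).1.getD pr.1.toNat 0
        else if pr.2 = '*' then total + ((pvDP lines).2.getD pr.1.toNat none).getD 0
        else total) 0 = _
  have hstep : (fun (total : Int) (pr : Int × Char) =>
      if pr.2 = '+' then total + (pvDP lines).1.getD pr.1.toNat 0
      else if pr.2 = '*' then total + ((pvDP lines).2.getD pr.1.toNat none).getD 0
      else total)
      = fun total pr => total + fB lines pr.1.toNat pr.2 := by
    funext total pr
    unfold fB
    split_ifs <;> simp
  rw [hstep, PySem.List.foldl_add, zero_add,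
    PySem.List.enumerate_eq_map_pyRange (pvLast lines) ' ']
  rw [PySem.List.len_eq, PySem.List.pyRange_zero_natCast, List.map_map, List.map_map]
  congr 1
  apply List.map_congr_left
  intro i _
  simp [Function.comp, PySem.List.pyGetD_natCast]

theorem contrib_eq (lines : List String) (hne : lines ≠ []) (hpre : Pre_part2 lines)
    (i : Nat) (hi : i < (pvLast lines).length) :
    ((gMark (pvLast lines) i).map (fA lines)).sum = fB lines i ((pvLast lines).getD i ' ') := by
  have hlastmem : lines.getLastD "" ∈ lines := getLastD_mem lines hne
  have hlast_nc : (pvLast lines).length ≤ pvNC lines := len_le_nc lines _ hlastmem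
  have hWnc := W_le_nc lines hne
  have hshift := dp_shift (pvColsB lines) (pvLiveL lines) (pvW lines) (pvNC lines) i 0
  simp only [Nat.zero_add] at hshift
  have hci : ∀ hinc : i < pvNC lines, (pvColsB lines).getD i "" = colStr lines i :=
    fun hinc => colsB_getD lines (pvNC lines) i hinc
  by_cases h1 : (pvLast lines).getD i ' ' = '+'
  · -- '+' marker
    obtain ⟨hscan, _⟩ := hpre.2 i hi (Or.inl h1)
    have hfacts := scanOk_spec lines i hscan
    have hiW : i < pvW lines := by
      have := (hfacts i (by omega) (readB_self lines i)).1 _ (headD_mem lines hne)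
      exact this
    have hinc : i < pvNC lines := by omega
    have hg : gMark (pvLast lines) i = [(i, '+')] := by
      unfold gMark; rw [if_pos h1, if_neg (by rw [h1]; decide), List.append_nil]
    rw [hg, h1]
    simp only [List.map_cons, List.map_nil, List.sum_cons, List.sum_nil, add_zero]
    unfold fA fB
    rw [if_pos rfl, if_pos rfl]
    dsimp only
    rw [show (pvDP lines).1.getD i 0
        = (dpB (pvColsB lines) (pvLiveL lines) (pvW lines) (pvNC lines) i).1.headD 0
      from hshift.1]
    by_cases hcol : pvCol lines i = []
    · -- empty start column: A sums [], B's entry is dead (0)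
      have hnum : pvNums lines i = [] := by
        unfold pvNums
        rw [show ((lines.headD "").toList.length - i) + 1 = pvW lines - i + 1 from rfl]
        have hw : pvW lines - i = (pvW lines - (i + 1)) + 1 ∨ pvW lines - i = 0 + 1 := by omega
        rw [gatherA]
        rw [get_numberA_eq lines i (fun l hl => (hfacts i (by omega) (readB_self lines i)).1 l hl)]
        rw [if_pos (by simp [colStr, hcol])]
      have hdead : (pvLiveL lines).getD i false = false := by
        have := liveAt_marker lines i hinc hi (Or.inl h1)
        rw [show (pvLiveL lines).getD i false = liveAt lines i from rfl, this, hci hinc]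
        simp [colStr, hcol]
      rw [hnum, (dp_head_dead _ _ _ _ i hinc hdead).1]
      rfl
    · have hliveI : liveAt lines i = true := by
        rw [liveAt_marker lines i hinc hi (Or.inl h1), hci hinc]
        simpa [colStr, String.ofList_eq_empty_iff] using hcol
      have hrun := run_dp lines hne (pvW lines) i (by omega) hiW hcol hliveI
        (fun k hk hr => (hfacts k hk hr).1)
      rw [hrun.1, add2A_eq]
      rfl
  · by_cases h2 : (pvLast lines).getD i ' ' = '*'
    · -- '*' marker
      obtain ⟨hscan, hstar⟩ := hpre.2 i hi (Or.inr h2)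
      have hcol : pvCol lines i ≠ [] := hstar h2
      have hfacts := scanOk_spec lines i hscan
      have hiW : i < pvW lines :=
        (hfacts i (by omega) (readB_self lines i)).1 _ (headD_mem lines hne)
      have hinc : i < pvNC lines := by omega
      have hg : gMark (pvLast lines) i = [(i, '*')] := by
        unfold gMark; rw [if_neg h1, if_pos h2, List.nil_append]
      rw [hg, h2]
      simp only [List.map_cons, List.map_nil, List.sum_cons, List.sum_nil, add_zero]
      unfold fA fB
      rw [if_neg (by simp), if_neg (by simp), if_pos rfl]
      dsimp only
      rw [show (pvDP lines).2.getD i none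
          = (dpB (pvColsB lines) (pvLiveL lines) (pvW lines) (pvNC lines) i).2.headD none
        from hshift.2]
      have hliveI : liveAt lines i = true := by
        rw [liveAt_marker lines i hinc hi (Or.inr h2), hci hinc]
        simpa [colStr, String.ofList_eq_empty_iff] using hcol
      have hrun := run_dp lines hne (pvW lines) i (by omega) hiW hcol hliveI
        (fun k hk hr => (hfacts k hk hr).1)
      rw [hrun.2]
      -- A's side: pvNums i is the same gather list, non-empty, and mul2A = its prod
      have hnum : pvNums lines i = gatherA lines (i : Int) (pvW lines - i + 1) := rfl
      have hinj : ∀ l ∈ lines, i < l.toList.length :=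
        fun l hl => (hfacts i (by omega) (readB_self lines i)).1 l hl
      have hshape : gatherA lines (i : Int) (pvW lines - i + 1)
          = get_numberA lines (i : Int) ::
            (if ((pvW lines : Int)) ≤ (i : Int) + 1 then []
             else gatherA lines ((i : Int) + 1) (pvW lines - i)) := by
        rw [gatherA]
        rw [if_neg (by
          rw [get_numberA_eq lines i hinj]
          simpa [colStr, String.ofList_eq_empty_iff] using hcol)]
        rfl
      rw [hnum, hshape, mul2A_eq, ← hshape]
      simp
    · -- no marker at i: both sides contribute 0
      have hg : gMark (pvLast lines) i = [] := by
        unfold gMark; rw [if_neg h1, if_neg h2, List.append_nil]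
      rw [hg]
      unfold fB
      rw [if_neg h1, if_neg h2]
      rfl

-- ===== VERDICT (by name: the statement is the Claim_ definition above) =====
theorem part2_spec : Claim_equal_part2 := by
  intro lines _hdom hpre
  unfold Spec_part2
  rw [partA_sum lines, partB_sum lines]
  congr 1
  apply List.map_congr_left
  intro i hi
  rw [List.mem_range] at hi
  exact contrib_eq lines hpre.1 hpre i hi
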